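-- pv_equiv track=rewrite | github.com/munimthahmid/BitFest | Challenge 2/app/utils/parse_recipes.py | parse_recipe_block
-- ===== SOURCE A (Python) =====
-- def parse_recipe_block(raw_block: str) -> dict:
--     """
--     Parses a single recipe text block (e.g., "Title: ...\nIngredients: ...\nInstructions: ...")
--     and returns a dict with the discovered fields.
--     Fields: Title, Ingredients, Instructions, Taste, Reviews, Cuisine, PrepTime, AdditionalTags
--     """
--     lines = raw_block.strip().split("\n")
--     recipe_data = {
--         "Title": None,
--         "Ingredients": None,
--         "Instructions": None,
--         "Taste": None,
--         "Reviews": None,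
--         "Cuisine": None,
--         "PrepTime": None,
--         "AdditionalTags": None
--     }
--
--     for line in lines:
--         # e.g. "Title: Chocolate Cake"
--         lower_line = line.lower().strip()
--         if lower_line.startswith("title:"):
--             recipe_data["Title"] = line.split(":", 1)[1].strip()
--         elif lower_line.startswith("ingredients:"):
--             recipe_data["Ingredients"] = line.split(":", 1)[1].strip()
--         elif lower_line.startswith("instructions:"):
--             recipe_data["Instructions"] = line.split(":", 1)[1].strip()
--         elif lower_line.startswith("taste:"):
--             recipe_data["Taste"] = line.split(":", 1)[1].strip()
--         elif lower_line.startswith("reviews:"):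
--             recipe_data["Reviews"] = line.split(":", 1)[1].strip()
--         elif lower_line.startswith("cuisine:"):
--             recipe_data["Cuisine"] = line.split(":", 1)[1].strip()
--         elif lower_line.startswith("preptime:"):
--             recipe_data["PrepTime"] = line.split(":", 1)[1].strip()
--         elif lower_line.startswith("additionaltags:"):
--             recipe_data["AdditionalTags"] = line.split(":", 1)[1].strip()
--
--     return recipe_data
-- ===== SOURCE B (Python) =====
-- def _find_field(lines, key):
--     prefix = key.lower() + ":"
--     for line in reversed(lines):
--         if line.lower().strip().startswith(prefix):
--             return line.split(":", 1)[1].strip()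
--     return None
--
--
-- def parse_recipe_block(raw_block: str) -> dict:
--     lines = raw_block.strip().split("\n")
--     fields = ["Title", "Ingredients", "Instructions", "Taste",
--               "Reviews", "Cuisine", "PrepTime", "AdditionalTags"]
--     return {key: _find_field(lines, key) for key in fields}
-- ===== Notes on version B (the rewrite author's own statement) =====
-- stated objective: alternative
-- what changed: Replaces the line-major 8-way if/elif chain mutating a dict with a field-major scan: for each of the 8 fields, find the last matching line in a reversed pass and build the result as a dict comprehension.
import Mathlib
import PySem

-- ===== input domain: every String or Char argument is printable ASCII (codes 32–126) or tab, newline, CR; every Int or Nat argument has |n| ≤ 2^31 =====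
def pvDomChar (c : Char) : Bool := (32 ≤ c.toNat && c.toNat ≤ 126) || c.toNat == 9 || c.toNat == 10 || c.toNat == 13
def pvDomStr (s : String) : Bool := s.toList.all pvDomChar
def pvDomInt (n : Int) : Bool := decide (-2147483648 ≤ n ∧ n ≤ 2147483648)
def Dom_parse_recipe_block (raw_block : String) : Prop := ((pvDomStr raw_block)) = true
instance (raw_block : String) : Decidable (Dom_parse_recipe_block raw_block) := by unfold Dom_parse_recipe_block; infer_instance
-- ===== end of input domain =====

-- B replaces A's line-major if/elif chain over a mutable dict by a field-major reversed scan
-- (last matching line per field); objective: alternative structure, same cost.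

-- ===== PORT A =====
-- line.split(":", 1)[1].strip() — in every branch where it is evaluated the line contains ':',
-- so index 1 exists and the .getD "" defaults are never used
def pvColonVal (line : String) : String :=
  PySem.Str.strip ((PySem.List.pyGet? ((PySem.Str.splitMax? line ":" 1).getD []) 1).getD "")

def pvStepA (d : PySem.Dict String (Option String)) (line : String) :
    PySem.Dict String (Option String) :=
  let lower_line := PySem.Str.strip (PySem.Str.lower line)
  if PySem.Str.startswith lower_line "title:" then d.insert "Title" (some (pvColonVal line))
  else if PySem.Str.startswith lower_line "ingredients:" then d.insert "Ingredients" (some (pvColonVal line))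
  else if PySem.Str.startswith lower_line "instructions:" then d.insert "Instructions" (some (pvColonVal line))
  else if PySem.Str.startswith lower_line "taste:" then d.insert "Taste" (some (pvColonVal line))
  else if PySem.Str.startswith lower_line "reviews:" then d.insert "Reviews" (some (pvColonVal line))
  else if PySem.Str.startswith lower_line "cuisine:" then d.insert "Cuisine" (some (pvColonVal line))
  else if PySem.Str.startswith lower_line "preptime:" then d.insert "PrepTime" (some (pvColonVal line))
  else if PySem.Str.startswith lower_line "additionaltags:" then d.insert "AdditionalTags" (some (pvColonVal line))
  else d

def parse_recipe_block (raw_block : String) : List (String × Option String) :=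
  let lines := (PySem.Str.split? (PySem.Str.strip raw_block) "\n").getD []
  let recipe_data : PySem.Dict String (Option String) :=
    PySem.Dict.ofList [("Title", none), ("Ingredients", none), ("Instructions", none),
      ("Taste", none), ("Reviews", none), ("Cuisine", none), ("PrepTime", none),
      ("AdditionalTags", none)]
  (lines.foldl pvStepA recipe_data).items

-- ===== PORT B =====
def pvFields : List String :=
  ["Title", "Ingredients", "Instructions", "Taste", "Reviews", "Cuisine", "PrepTime", "AdditionalTags"]

def pvFindField (lines : List String) (key : String) : Option String :=
  (lines.reverse.find? (fun line =>
      PySem.Str.startswith (PySem.Str.strip (PySem.Str.lower line)) (PySem.Str.lower key ++ ":"))).map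
    pvColonVal

def parse_recipe_block_alt (raw_block : String) : List (String × Option String) :=
  let lines := (PySem.Str.split? (PySem.Str.strip raw_block) "\n").getD []
  pvFields.map (fun key => (key, pvFindField lines key))

-- ===== PRECONDITION & SPEC =====
def Spec_parse_recipe_block (raw_block : String) (out : List (String × Option String)) : Prop := out = parse_recipe_block_alt raw_block
instance (raw_block : String) (out : List (String × Option String)) : Decidable (Spec_parse_recipe_block raw_block out) := by unfold Spec_parse_recipe_block; infer_instance

-- ===== CLAIM (what is proved, stated in full; the proofs are below) =====
def Claim_equal_parse_recipe_block : Prop := ∀ (raw_block : String), Dom_parse_recipe_block raw_block → Spec_parse_recipe_block raw_block (parse_recipe_block raw_block)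

-- ===== LEMMAS AND PROOFS =====

def pvCond (line key : String) : Bool :=
  PySem.Str.startswith (PySem.Str.strip (PySem.Str.lower line)) (PySem.Str.lower key ++ ":")

lemma pvNoPrefix :
    List.Pairwise (fun p q : String => ¬ ((PySem.Str.lower p ++ ":").toList <+: (PySem.Str.lower q ++ ":").toList)
      ∧ ¬ ((PySem.Str.lower q ++ ":").toList <+: (PySem.Str.lower p ++ ":").toList)) pvFields := by
  decide

lemma pvExcl {line k k' : String} (hk : k ∈ pvFields) (hk' : k' ∈ pvFields)
    (h : pvCond line k = true) (h' : pvCond line k' = true) : k = k' := by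
  by_contra hne
  have hp : (PySem.Str.lower k ++ ":").toList <+: (PySem.Str.strip (PySem.Str.lower line)).toList := by
    have := (PySem.Chars.startswith_iff _ _).mp (by simpa [pvCond] using h)
    simpa using this
  have hp' : (PySem.Str.lower k' ++ ":").toList <+: (PySem.Str.strip (PySem.Str.lower line)).toList := by
    have := (PySem.Chars.startswith_iff _ _).mp (by simpa [pvCond] using h')
    simpa using this
  have hpair := List.Pairwise.forall (l := pvFields)
    (fun a b hab => ⟨hab.2, hab.1⟩) pvNoPrefix hk hk' hne
  rcases le_total (PySem.Str.lower k ++ ":").toList.length (PySem.Str.lower k' ++ ":").toList.length with hle | hle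
  · exact hpair.1 (List.prefix_of_prefix_length_le hp hp' hle)
  · exact hpair.2 (List.prefix_of_prefix_length_le hp' hp hle)

lemma pvFind_eq_some {line k : String} (hk : k ∈ pvFields) (h : pvCond line k = true) :
    pvFields.find? (pvCond line) = some k := by
  obtain ⟨k', hfind⟩ := Option.isSome_iff_exists.mp
    (List.find?_isSome.mpr ⟨k, hk, h⟩)
  have hk'mem := List.mem_of_find?_eq_some hfind
  have hk'cond := List.find?_some hfind
  rw [hfind, pvExcl hk'mem hk hk'cond h]

lemma pvStepA_eq (d : PySem.Dict String (Option String)) (line : String) :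
    pvStepA d line =
      match pvFields.find? (pvCond line) with
      | some k => d.insert k (some (pvColonVal line))
      | none => d := by
  have e1 : PySem.Chars.lower ['T', 'i', 't', 'l', 'e'] ++ [':'] = ['t', 'i', 't', 'l', 'e', ':'] := by decide
  have e2 : PySem.Chars.lower ['I', 'n', 'g', 'r', 'e', 'd', 'i', 'e', 'n', 't', 's'] ++ [':'] = ['i', 'n', 'g', 'r', 'e', 'd', 'i', 'e', 'n', 't', 's', ':'] := by decide
  have e3 : PySem.Chars.lower ['I', 'n', 's', 't', 'r', 'u', 'c', 't', 'i', 'o', 'n', 's'] ++ [':'] = ['i', 'n', 's', 't', 'r', 'u', 'c', 't', 'i', 'o', 'n', 's', ':'] := by decide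
  have e4 : PySem.Chars.lower ['T', 'a', 's', 't', 'e'] ++ [':'] = ['t', 'a', 's', 't', 'e', ':'] := by decide
  have e5 : PySem.Chars.lower ['R', 'e', 'v', 'i', 'e', 'w', 's'] ++ [':'] = ['r', 'e', 'v', 'i', 'e', 'w', 's', ':'] := by decide
  have e6 : PySem.Chars.lower ['C', 'u', 'i', 's', 'i', 'n', 'e'] ++ [':'] = ['c', 'u', 'i', 's', 'i', 'n', 'e', ':'] := by decide
  have e7 : PySem.Chars.lower ['P', 'r', 'e', 'p', 'T', 'i', 'm', 'e'] ++ [':'] = ['p', 'r', 'e', 'p', 't', 'i', 'm', 'e', ':'] := by decide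
  have e8 : PySem.Chars.lower ['A', 'd', 'd', 'i', 't', 'i', 'o', 'n', 'a', 'l', 'T', 'a', 'g', 's'] ++ [':'] = ['a', 'd', 'd', 'i', 't', 'i', 'o', 'n', 'a', 'l', 't', 'a', 'g', 's', ':'] := by decide
  simp only [pvStepA]
  split_ifs with h1 h2 h3 h4 h5 h6 h7 h8 <;>
    simp_all [pvFields, pvCond, List.find?]

lemma pvLoop (lines : List String) (g : String → Option String) :
    (lines.foldl pvStepA (PySem.Dict.mk (pvFields.map (fun k => (k, g k))))).items
      = pvFields.map (fun k => (k,
          match lines.reverse.find? (fun l => pvCond l k) with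
          | some l => some (pvColonVal l)
          | none => g k)) := by
  induction lines generalizing g with
  | nil => simp
  | cons line rest ih =>
    rw [List.foldl_cons]
    have hstep := pvStepA_eq (PySem.Dict.mk (pvFields.map (fun k => (k, g k)))) line
    rcases hfind : pvFields.find? (pvCond line) with _ | k0
    · rw [hfind] at hstep
      simp only at hstep
      rw [hstep, ih g]
      refine List.map_congr_left (fun k hk => ?_)
      have hc : pvCond line k = false := by
        by_contra hcc
        rw [pvFind_eq_some hk (by simpa using hcc)] at hfind
        exact Option.some_ne_none k hfind
      rcases hr : rest.reverse.find? (fun l => pvCond l k) with _ | l <;>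
        simp [List.reverse_cons, List.find?_append, hr, hc]
    · have hk0 := List.mem_of_find?_eq_some hfind
      have hc0 := List.find?_some hfind
      rw [hfind] at hstep
      simp only at hstep
      have hcont : (PySem.Dict.mk (pvFields.map (fun k => (k, g k)))).contains k0 = true := by
        rw [PySem.Dict.contains_mk]
        exact List.any_eq_true.mpr ⟨(k0, g k0), List.mem_map_of_mem hk0, by simp⟩
      have hmk : pvStepA (PySem.Dict.mk (pvFields.map (fun k => (k, g k)))) line
          = PySem.Dict.mk (pvFields.map (fun k =>
              (k, if k == k0 then some (pvColonVal line) else g k))) := by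
        rw [hstep]
        apply PySem.Dict.ext
        rw [PySem.Dict.items_insert_of_contains _ _ hcont]
        have hit : (PySem.Dict.mk (pvFields.map (fun k => (k, g k)))).items
            = pvFields.map (fun k => (k, g k)) := rfl
        rw [hit, List.map_map]
        show _ = pvFields.map fun k => (k, if (k == k0) = true then some (pvColonVal line) else g k)
        refine List.map_congr_left (fun k hk => ?_)
        by_cases hkk : k = k0 <;> simp [hkk]
      rw [hmk, ih]
      refine List.map_congr_left (fun k hk => ?_)
      rcases hr : rest.reverse.find? (fun l => pvCond l k) with _ | l
      · by_cases hck : pvCond line k = true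
        · have hkk0 : k = k0 := pvExcl hk hk0 hck hc0
          subst hkk0
          simp [List.reverse_cons, List.find?_append, hr, hck]
        · have hne : ¬ (k == k0) = true := by
            simp only [beq_iff_eq]
            rintro rfl
            exact hck hc0
          simp [List.reverse_cons, List.find?_append, hr, hck, hne]
      · simp [List.reverse_cons, List.find?_append, hr]

-- ===== VERDICT (by name: the statement is the Claim_ definition above) =====
theorem parse_recipe_block_spec : Claim_equal_parse_recipe_block := by
  intro raw _
  show parse_recipe_block raw = parse_recipe_block_alt raw
  unfold parse_recipe_block parse_recipe_block_alt pvFindField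
  have hof : (PySem.Dict.ofList [("Title", none), ("Ingredients", none), ("Instructions", none),
        ("Taste", none), ("Reviews", none), ("Cuisine", none), ("PrepTime", none),
        ("AdditionalTags", none)] : PySem.Dict String (Option String))
      = PySem.Dict.mk (pvFields.map (fun k => (k, (none : Option String)))) := by decide
  rw [hof, pvLoop]
  refine List.map_congr_left fun k hk => ?_
  have hl : (fun line => PySem.Str.startswith (PySem.Str.strip (PySem.Str.lower line))
      (PySem.Str.lower k ++ ":")) = fun l => pvCond l k := rfl
  rw [hl]
  cases hfo : List.find? (fun l => pvCond l k)
      ((PySem.Str.split? (PySem.Str.strip raw) "\n").getD []).reverse <;> simp [hfo]
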